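-- pv_equiv track=rewrite | github.com/0trifix/Python | Week 2/opdrachten/opdracht13.py | toegangsprijs
-- ===== SOURCE A (Python) =====
-- def toegangsprijs(leeftijd_lijst):
--     prijslijst = []
--     for leeftijd in leeftijd_lijst:
--         if leeftijd < 3:
--             prijs = 0
--         elif leeftijd <= 12:
--             prijs = 15
--         elif leeftijd >= 65:
--             prijs = 20
--         else:
--             prijs = 30
--         prijslijst.append(prijs)
--
--     return prijslijst
-- ===== SOURCE B (Python) =====
-- import bisect
--
-- _BOUNDARIES = [3, 13, 65]
-- _PRICES = [0, 15, 30, 20]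
--
-- def toegangsprijs(leeftijd_lijst):
--     return [_PRICES[bisect.bisect_right(_BOUNDARIES, leeftijd)]
--             for leeftijd in leeftijd_lijst]
-- ===== Notes on version B (the rewrite author's own statement) =====
-- stated objective: idiomatic
-- what changed: Replaced the if/elif cascade with a sorted boundary table [3,13,65] plus a parallel price table, indexed per age via bisect.bisect_right in a list comprehension.
import Mathlib
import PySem

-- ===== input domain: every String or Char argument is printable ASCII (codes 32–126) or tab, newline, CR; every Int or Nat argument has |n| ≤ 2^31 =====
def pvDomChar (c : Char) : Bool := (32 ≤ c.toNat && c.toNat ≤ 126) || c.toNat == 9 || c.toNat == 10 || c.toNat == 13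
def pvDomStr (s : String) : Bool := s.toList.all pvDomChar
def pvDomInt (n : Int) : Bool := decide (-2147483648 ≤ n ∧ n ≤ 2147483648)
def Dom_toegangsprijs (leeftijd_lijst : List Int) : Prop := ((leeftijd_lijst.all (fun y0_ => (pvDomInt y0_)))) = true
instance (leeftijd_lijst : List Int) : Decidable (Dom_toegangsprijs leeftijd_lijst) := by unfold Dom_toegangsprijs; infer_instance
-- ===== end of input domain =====

-- B replaces A's if/elif cascade by a sorted boundary table and a parallel price
-- table, looked up per age with bisect_right (idiomatic table lookup; same cost).

-- ===== PORT A =====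
-- literal transliteration: accumulator list, append one price per age
def toegangsprijs (leeftijd_lijst : List Int) : List Int :=
  leeftijd_lijst.foldl
    (fun prijslijst leeftijd =>
      let prijs : Int :=
        if leeftijd < 3 then 0
        else if leeftijd ≤ 12 then 15
        else if leeftijd ≥ 65 then 20
        else 30
      prijslijst ++ [prijs])
    []

-- ===== PORT B =====
-- bisect.bisect_right on a sorted list = number of elements ≤ x (ported as countP)
def pvBisectRight (xs : List Int) (x : Int) : Nat :=
  xs.countP (fun b => decide (b ≤ x))

def toegangsprijs_alt (leeftijd_lijst : List Int) : List Int :=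
  let boundaries : List Int := [3, 13, 65]
  let prices : List Int := [0, 15, 30, 20]
  leeftijd_lijst.map (fun leeftijd => prices.getD (pvBisectRight boundaries leeftijd) 0)

-- ===== PRECONDITION & SPEC =====
def Spec_toegangsprijs (leeftijd_lijst : List Int) (out : List Int) : Prop := out = toegangsprijs_alt leeftijd_lijst
instance (leeftijd_lijst : List Int) (out : List Int) : Decidable (Spec_toegangsprijs leeftijd_lijst out) := by unfold Spec_toegangsprijs; infer_instance

-- ===== CLAIM (what is proved, stated in full; the proofs are below) =====
def Claim_equal_toegangsprijs : Prop := ∀ (leeftijd_lijst : List Int), Dom_toegangsprijs leeftijd_lijst → Spec_toegangsprijs leeftijd_lijst (toegangsprijs leeftijd_lijst)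

-- ===== LEMMAS AND PROOFS =====

-- pointwise: the cascade price equals the table lookup
theorem price_pointwise (a : Int) :
    (if a < 3 then (0:Int) else if a ≤ 12 then 15 else if a ≥ 65 then 20 else 30)
      = ([0, 15, 30, 20] : List Int).getD (pvBisectRight [3, 13, 65] a) 0 := by
  simp only [pvBisectRight, List.countP_cons, List.countP_nil]
  by_cases h3 : (3:Int) ≤ a <;> by_cases h13 : (13:Int) ≤ a <;> by_cases h65 : (65:Int) ≤ a <;>
    simp [h3, h13, h65] <;> split_ifs <;> first | rfl | omega

-- A's foldl-append loop produces the map, for any accumulator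
theorem foldA_eq_map (l : List Int) (acc : List Int) :
    l.foldl
      (fun prijslijst leeftijd =>
        let prijs : Int :=
          if leeftijd < 3 then 0
          else if leeftijd ≤ 12 then 15
          else if leeftijd ≥ 65 then 20
          else 30
        prijslijst ++ [prijs])
      acc
    = acc ++ l.map (fun a => ([0, 15, 30, 20] : List Int).getD (pvBisectRight [3, 13, 65] a) 0) := by
  induction l generalizing acc with
  | nil => simp
  | cons x xs ih => simp [List.foldl_cons, ih, price_pointwise x]

-- ===== VERDICT (by name: the statement is the Claim_ definition above) =====
theorem toegangsprijs_spec : Claim_equal_toegangsprijs := by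
  intro l _
  unfold Spec_toegangsprijs toegangsprijs toegangsprijs_alt
  simpa using foldA_eq_map l []
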